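-- pv_equiv track=rewrite | github.com/hadi77ir/ColabDownloader | ColabChunkedDownloader.py | build_download_runs
-- ===== SOURCE A (Python) =====
-- def build_download_runs(states):
--     runs = []
--     current_run = []
--     previous_chunk_index = None
--
--     for state in states:
--         if not state["needs_download"]:
--             if current_run:
--                 runs.append(current_run)
--                 current_run = []
--             previous_chunk_index = None
--             continue
--
--         starts_with_partial = state["local_size"] > 0
--
--         if current_run:
--             contiguous = state["chunk_index"] == previous_chunk_index + 1
--             if (not contiguous) or starts_with_partial:
--                 runs.append(current_run)
--                 current_run = []
--
--         current_run.append(state)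
--         previous_chunk_index = state["chunk_index"]
--
--     if current_run:
--         runs.append(current_run)
--
--     return runs
-- ===== SOURCE B (Python) =====
-- def build_download_runs(states):
--     # Pass 1: assign a run id to every download-needing state; reset on gaps.
--     keyed = []
--     prev = None
--     run_id = 0
--     for state in states:
--         if not state["needs_download"]:
--             prev = None
--             continue
--         if prev is None or state["chunk_index"] != prev["chunk_index"] + 1 or state["local_size"] > 0:
--             run_id += 1
--         keyed.append((run_id, state))
--         prev = state
--     # Pass 2: group contiguous equal run ids.
--     groups = []
--     for rid, state in keyed:
--         if groups and groups[-1][0] == rid: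
--             groups[-1][1].append(state)
--         else:
--             groups.append((rid, [state]))
--     return [group for _, group in groups]
-- ===== Notes on version B (the rewrite author's own statement) =====
-- stated objective: alternative
-- what changed: Replaces A's interleaved runs/current_run accumulator with a key-then-group decomposition: pass 1 tags each download-needing state with a run id (incremented on gaps, partial files, and after non-download chunks), pass 2 groups contiguous equal ids.
import Mathlib
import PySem

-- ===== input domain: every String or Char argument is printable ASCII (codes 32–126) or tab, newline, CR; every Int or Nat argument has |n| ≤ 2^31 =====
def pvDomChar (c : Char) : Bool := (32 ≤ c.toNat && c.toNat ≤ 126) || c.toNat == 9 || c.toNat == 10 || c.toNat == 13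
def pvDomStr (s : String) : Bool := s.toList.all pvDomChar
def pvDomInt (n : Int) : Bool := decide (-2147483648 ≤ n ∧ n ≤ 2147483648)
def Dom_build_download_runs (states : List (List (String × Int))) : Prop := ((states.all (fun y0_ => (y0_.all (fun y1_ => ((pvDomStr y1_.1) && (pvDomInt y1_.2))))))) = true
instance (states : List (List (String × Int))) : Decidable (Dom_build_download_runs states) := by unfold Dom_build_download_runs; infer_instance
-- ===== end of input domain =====

-- B replaces A's interleaved runs/current_run accumulator by a key-then-group decomposition
-- (pass 1 tags each download state with a run id, pass 2 groups equal contiguous ids); alternative, same cost.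

-- shared dict subscript: state["k"] (total stand-in; Pre_ excludes the KeyError inputs)
def pvKey (state : List (String × Int)) (k : String) : Int :=
  PySem.Dict.getD (PySem.Dict.mk state) k 0

-- ===== PORT A =====
def stepA (acc : List (List (List (String × Int))) × List (List (String × Int)) × Option Int)
    (state : List (String × Int)) :
    List (List (List (String × Int))) × List (List (String × Int)) × Option Int :=
  let (runs, cur, prev) := acc
  if pvKey state "needs_download" = 0 then
    ((if cur = [] then runs else runs ++ [cur]), [], none)
  else
    let startsPartial := pvKey state "local_size" > 0
    let (runs, cur) :=
      if cur = [] then (runs, cur)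
      else
        let contiguous := pvKey state "chunk_index" = prev.getD 0 + 1
        if ¬ contiguous ∨ startsPartial then (runs ++ [cur], []) else (runs, cur)
    (runs, cur ++ [state], some (pvKey state "chunk_index"))

def build_download_runs (states : List (List (String × Int))) : List (List (List (String × Int))) :=
  let (runs, cur, _) := states.foldl stepA ([], [], none)
  if cur = [] then runs else runs ++ [cur]

-- ===== PORT B =====
-- pass 1: tag each download-needing state with its run id
def stepB (acc : List (Int × List (String × Int)) × Option (List (String × Int)) × Int)
    (state : List (String × Int)) :
    List (Int × List (String × Int)) × Option (List (String × Int)) × Int :=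
  let (keyed, prev, rid) := acc
  if pvKey state "needs_download" = 0 then (keyed, none, rid)
  else
    let rid' :=
      match prev with
      | none => rid + 1
      | some p =>
          if pvKey state "chunk_index" ≠ pvKey p "chunk_index" + 1 ∨ pvKey state "local_size" > 0
          then rid + 1 else rid
    (keyed ++ [(rid', state)], some state, rid')

-- pass 2: group contiguous equal run ids
def gstep (groups : List (Int × List (List (String × Int)))) (x : Int × List (String × Int)) :
    List (Int × List (List (String × Int))) :=
  match groups.getLast? with
  | some last =>
      if last.1 = x.1 then groups.dropLast ++ [(last.1, last.2 ++ [x.2])]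
      else groups ++ [(x.1, [x.2])]
  | none => groups ++ [(x.1, [x.2])]

def build_download_runs_alt (states : List (List (String × Int))) : List (List (List (String × Int))) :=
  let (keyed, _, _) := states.foldl stepB ([], none, 0)
  (keyed.foldl gstep []).map Prod.snd

-- ===== PRECONDITION & SPEC =====
-- Pre_ excludes exactly the inputs where Python A raises KeyError: a state missing
-- "needs_download", or a download-needing state missing "local_size" or "chunk_index".
def Pre_build_download_runs (states : List (List (String × Int))) : Prop :=
  ∀ state ∈ states,
    ((PySem.Dict.mk state).get? "needs_download").isSome ∧
    (pvKey state "needs_download" ≠ 0 →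
      ((PySem.Dict.mk state).get? "local_size").isSome ∧
      ((PySem.Dict.mk state).get? "chunk_index").isSome)
instance (states : List (List (String × Int))) : Decidable (Pre_build_download_runs states) := by
  unfold Pre_build_download_runs; infer_instance

def pvWitness_build_download_runs : (List (List (String × Int))) :=
  [[("needs_download", 1), ("local_size", 0), ("chunk_index", 0)],
   [("needs_download", 0)]]

def Spec_build_download_runs (states : List (List (String × Int))) (out : List (List (List (String × Int)))) : Prop := out = build_download_runs_alt states
instance (states : List (List (String × Int))) (out : List (List (List (String × Int)))) : Decidable (Spec_build_download_runs states out) := by unfold Spec_build_download_runs; infer_instance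

-- ===== CLAIM (what is proved, stated in full; the proofs are below) =====
def Claim_equal_build_download_runs : Prop := ∀ (states : List (List (String × Int))), Dom_build_download_runs states → Pre_build_download_runs states → Spec_build_download_runs states (build_download_runs states)

-- ===== LEMMAS AND PROOFS =====

-- Invariant linking A's (runs, current_run, previous_chunk_index) to B's (keyed, prev, run_id),
-- through the grouping of the keyed list built so far.
def RunInv (accA : List (List (List (String × Int))) × List (List (String × Int)) × Option Int)
    (accB : List (Int × List (String × Int)) × Option (List (String × Int)) × Int) : Prop :=
  (∀ e ∈ accB.1.foldl gstep [], e.1 ≤ accB.2.2) ∧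
  match accB.2.1 with
  | none => accA.2.2 = none ∧ accA.2.1 = [] ∧ (accB.1.foldl gstep []).map Prod.snd = accA.1
  | some p => accA.2.2 = some (pvKey p "chunk_index") ∧ accA.2.1 ≠ [] ∧
      ∃ ginit, accB.1.foldl gstep [] = ginit ++ [(accB.2.2, accA.2.1)] ∧
        ginit.map Prod.snd = accA.1

lemma gstep_push (g : List (Int × List (List (String × Int)))) (x : Int × List (String × Int))
    (h : ∀ l ∈ g.getLast?, l.1 ≠ x.1) : gstep g x = g ++ [(x.1, [x.2])] := by
  unfold gstep
  cases hl : g.getLast? with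
  | none => rfl
  | some l => simp [h l (by simp [hl])]

lemma gstep_extend (gi : List (Int × List (List (String × Int)))) (r : Int)
    (c : List (List (String × Int))) (x : Int × List (String × Int)) (h : x.1 = r) :
    gstep (gi ++ [(r, c)]) x = gi ++ [(r, c ++ [x.2])] := by
  unfold gstep
  rw [List.getLast?_concat]
  simp [h]

lemma step_inv (accA : List (List (List (String × Int))) × List (List (String × Int)) × Option Int)
    (accB : List (Int × List (String × Int)) × Option (List (String × Int)) × Int)
    (s : List (String × Int)) (h : RunInv accA accB) :
    RunInv (stepA accA s) (stepB accB s) := by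
  obtain ⟨runs, cur, prev⟩ := accA
  obtain ⟨keyed, prevB, rid⟩ := accB
  obtain ⟨hbound, hrest⟩ := h
  simp only at hbound hrest
  by_cases hnd : pvKey s "needs_download" = 0
  · -- non-download chunk: A flushes current_run, B only resets prev
    have eA : stepA (runs, cur, prev) s =
        ((if cur = [] then runs else runs ++ [cur]), [], none) := by simp [stepA, hnd]
    have eB : stepB (keyed, prevB, rid) s = (keyed, none, rid) := by simp [stepB, hnd]
    rw [eA, eB]
    cases prevB with
    | none =>
      obtain ⟨hp, hc, hg⟩ := hrest
      exact ⟨hbound, rfl, rfl, by simp [hc, hg]⟩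
    | some p =>
      obtain ⟨hp, hc, ginit, hg, hmap⟩ := hrest
      refine ⟨hbound, rfl, rfl, ?_⟩
      rw [if_neg hc, hg]
      simp [hmap]
  · cases prevB with
    | none =>
      -- first download chunk of a fresh run
      obtain ⟨hp, hc, hg⟩ := hrest
      subst hp hc
      have eA : stepA (runs, [], none) s =
          (runs, [s], some (pvKey s "chunk_index")) := by simp [stepA, hnd]
      have eB : stepB (keyed, none, rid) s = (keyed ++ [(rid + 1, s)], some s, rid + 1) := by
        simp [stepB, hnd]
      have hpush : (keyed ++ [(rid + 1, s)]).foldl gstep [] =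
          keyed.foldl gstep [] ++ [(rid + 1, [s])] := by
        rw [List.foldl_append]
        simp only [List.foldl_cons, List.foldl_nil]
        exact gstep_push _ _ (fun l hl => by
          have : l.1 ≤ rid := hbound l (List.mem_of_getLast? hl)
          show l.1 ≠ rid + 1
          omega)
      rw [eA, eB]
      refine ⟨?_, rfl, by simp, keyed.foldl gstep [], by simpa using hpush, hg⟩
      intro e he
      show e.1 ≤ rid + 1
      rw [show (keyed ++ [(rid + 1, s)], some s, rid + 1).1 = keyed ++ [(rid + 1, s)] from rfl,
        hpush] at he
      rcases List.mem_append.mp he with h1 | h1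
      · exact le_trans (hbound e h1) (by omega)
      · rcases List.mem_singleton.mp h1 with rfl; simp
    | some p =>
      -- download chunk right after another download chunk
      obtain ⟨hp, hc, ginit, hg, hmap⟩ := hrest
      subst hp
      by_cases hbr : pvKey s "chunk_index" ≠ pvKey p "chunk_index" + 1 ∨ pvKey s "local_size" > 0
      · -- run breaks: A flushes, B starts a new id
        have eA : stepA (runs, cur, some (pvKey p "chunk_index")) s =
            (runs ++ [cur], [s], some (pvKey s "chunk_index")) := by
          simp only [stepA, if_neg hnd, if_neg hc, Option.getD_some]
          rw [if_pos (by tauto)]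
          rfl
        have eB : stepB (keyed, some p, rid) s =
            (keyed ++ [(rid + 1, s)], some s, rid + 1) := by
          simp only [stepB, if_neg hnd]
          rw [if_pos hbr]
        have hgacc : (keyed ++ [(rid + 1, s)]).foldl gstep [] =
            ginit ++ [(rid, cur)] ++ [(rid + 1, [s])] := by
          rw [List.foldl_append, hg]
          simp only [List.foldl_cons, List.foldl_nil]
          rw [gstep_push _ _ (fun l hl => by
            rw [List.getLast?_concat] at hl
            simp only [Option.mem_def, Option.some.injEq] at hl
            subst hl
            show rid ≠ ((rid : Int) + 1, s).1
            simp)]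
        rw [eA, eB]
        refine ⟨?_, rfl, by simp, ginit ++ [(rid, cur)], by simpa using hgacc, by simp [hmap]⟩
        intro e he
        show e.1 ≤ rid + 1
        rw [show (keyed ++ [(rid + 1, s)], some s, rid + 1).1 = keyed ++ [(rid + 1, s)] from rfl,
          hgacc] at he
        rw [hg] at hbound
        rcases List.mem_append.mp he with h1 | h1
        · exact le_trans (hbound e h1) (by omega)
        · rcases List.mem_singleton.mp h1 with rfl; simp
      · -- run continues: A appends, B keeps the id and extends the last group
        push_neg at hbr
        obtain ⟨hcontig, hpartial⟩ := hbr
        have eA : stepA (runs, cur, some (pvKey p "chunk_index")) s =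
            (runs, cur ++ [s], some (pvKey s "chunk_index")) := by
          simp only [stepA, if_neg hnd, if_neg hc, Option.getD_some]
          rw [if_neg (by push_neg; exact ⟨hcontig, by omega⟩)]
        have eB : stepB (keyed, some p, rid) s = (keyed ++ [(rid, s)], some s, rid) := by
          simp only [stepB, if_neg hnd]
          rw [if_neg (by push_neg; exact ⟨hcontig, hpartial⟩)]
        have hgacc : (keyed ++ [(rid, s)]).foldl gstep [] = ginit ++ [(rid, cur ++ [s])] := by
          rw [List.foldl_append, hg]
          simp only [List.foldl_cons, List.foldl_nil]
          exact gstep_extend _ _ _ _ rfl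
        rw [eA, eB]
        refine ⟨?_, rfl, by simp [hc], ginit, by simpa using hgacc, hmap⟩
        intro e he
        show e.1 ≤ rid
        rw [show (keyed ++ [(rid, s)], some s, rid).1 = keyed ++ [(rid, s)] from rfl,
          hgacc] at he
        rw [hg] at hbound
        rcases List.mem_append.mp he with h1 | h1
        · exact hbound e (List.mem_append.mpr (Or.inl h1))
        · rcases List.mem_singleton.mp h1 with rfl; simp

lemma fold_inv (states : List (List (String × Int)))
    (accA : List (List (List (String × Int))) × List (List (String × Int)) × Option Int)
    (accB : List (Int × List (String × Int)) × Option (List (String × Int)) × Int)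
    (h : RunInv accA accB) :
    RunInv (states.foldl stepA accA) (states.foldl stepB accB) := by
  induction states generalizing accA accB with
  | nil => exact h
  | cons s rest ih => exact ih _ _ (step_inv _ _ s h)

-- ===== VERDICT (by name: the statement is the Claim_ definition above) =====
theorem build_download_runs_spec : Claim_equal_build_download_runs := by
  intro states _ _
  unfold Spec_build_download_runs build_download_runs build_download_runs_alt
  have h := fold_inv states ([], [], none) ([], none, 0) ⟨by simp, rfl, rfl, rfl⟩
  rcases hFA : List.foldl stepA ([], [], none) states with ⟨runs, cur, prev⟩
  rcases hFB : List.foldl stepB ([], none, 0) states with ⟨keyed, prevB, rid⟩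
  rw [hFA, hFB] at h
  obtain ⟨hbound, hrest⟩ := h
  simp only at hrest
  show (if cur = [] then runs else runs ++ [cur]) = (keyed.foldl gstep []).map Prod.snd
  cases prevB with
  | none =>
    obtain ⟨hp, hc, hg⟩ := hrest
    rw [if_pos hc]
    exact hg.symm
  | some p =>
    obtain ⟨hp, hc, ginit, hg, hmap⟩ := hrest
    rw [if_neg hc, hg]
    simp [hmap]
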